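-- pv_equiv track=rewrite | github.com/techtoto/advent-of-code-2024 | day09/day09.py | get_suiting_free_block
-- ===== SOURCE A (Python) =====
-- def get_suiting_free_block(n, disk: list):
--     i = disk.index(None)
--     current_block_length = get_block_length(i, disk)
--     while n > current_block_length:
--         try:
--             i = disk.index(None, i + current_block_length)
--         except ValueError:
--             return None
--         current_block_length = get_block_length(i, disk)
--     return i
--
-- def get_block_length(i, disk: list):
--     for j in range(i, len(disk)):
--         if disk[i] != disk[j]:
--             return j - i
--     return j - i + 1
-- ===== SOURCE B (Python) =====
-- def get_suiting_free_block(n, disk: list):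
--     # Single left-to-right counting scan: track the start and length of the
--     # current run of free (None) cells; return the run start as soon as the
--     # run length reaches n.  Returns None when no run is long enough (also
--     # when the disk has no free cell at all, where A raises ValueError).
--     run_start = 0
--     run_len = 0
--     for j, cell in enumerate(disk):
--         if cell is None:
--             if run_len == 0:
--                 run_start = j
--             run_len += 1
--             if run_len >= n:
--                 return run_start
--         else:
--             run_len = 0
--     return None
-- ===== Notes on version B (the rewrite author's own statement) =====
-- stated objective: simpler
-- what changed: Replaces A's index()-hopping between free blocks with its get_block_length helper by one plain element-by-element scan that maintains the current free run's start and length and returns the moment the run reaches n.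
import Mathlib
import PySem

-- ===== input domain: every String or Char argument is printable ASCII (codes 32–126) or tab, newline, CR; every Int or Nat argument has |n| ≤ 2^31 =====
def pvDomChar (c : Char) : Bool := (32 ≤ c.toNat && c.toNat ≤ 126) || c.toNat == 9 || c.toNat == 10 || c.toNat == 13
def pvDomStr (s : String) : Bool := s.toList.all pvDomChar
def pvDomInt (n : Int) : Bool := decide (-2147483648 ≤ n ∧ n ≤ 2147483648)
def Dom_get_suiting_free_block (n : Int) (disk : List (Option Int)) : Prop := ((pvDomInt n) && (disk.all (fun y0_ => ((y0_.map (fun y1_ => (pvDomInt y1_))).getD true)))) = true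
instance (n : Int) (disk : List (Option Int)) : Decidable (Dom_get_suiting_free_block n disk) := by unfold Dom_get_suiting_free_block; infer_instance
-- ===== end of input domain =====

-- B replaces A's index()-hopping over free blocks (with its run-length helper) by one
-- element-by-element counting scan; same cost, simpler; where A raises ValueError
-- (no free cell) B returns None — that region is outside Pre_ and stated in Raises_.

-- ===== PORT A =====
-- helper: the 'for j in range(i, len(disk))' loop of get_block_length.
-- Exact for 0 ≤ i < len(disk) (its only use: i always comes from disk.index(None)).
-- When the loop finishes, Python returns j - i + 1 with j = len-1, i.e. len - i,
-- which is what the j ≥ len branch returns here (j arrives there as exactly len).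
def blockLenGo (i : Nat) (disk : List (Option Int)) (j : Nat) : Nat :=
  if _h : j < disk.length then
    if disk.getD i none ≠ disk.getD j none then j - i
    else blockLenGo i disk (j + 1)
  else j - i
termination_by disk.length - j
decreasing_by omega

def get_block_length (i : Nat) (disk : List (Option Int)) : Nat := blockLenGo i disk i

-- termination facts for the while-loop below (the port cites them in decreasing_by)
theorem blockLenGo_lb (i : Nat) (disk : List (Option Int)) (j : Nat) :
    j ≤ i + blockLenGo i disk j := by
  rw [blockLenGo]
  split_ifs with h1 h2
  · omega
  · have ih := blockLenGo_lb i disk (j + 1); omega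
  · omega
termination_by disk.length - j
decreasing_by omega

theorem get_block_length_pos (i : Nat) (disk : List (Option Int)) (h : i < disk.length) :
    1 ≤ get_block_length i disk := by
  unfold get_block_length
  rw [blockLenGo, dif_pos h, if_neg (by simp)]
  have := blockLenGo_lb i disk (i + 1); omega

-- the 'while n > current_block_length' loop of A; recomputes current_block_length at
-- entry exactly as Python holds it; disk.index(None, i + cur) is index? on the
-- dropped suffix shifted back (exact: the start argument is nonnegative here).
def awhile (n : Int) (disk : List (Option Int)) (i : Nat) : Option Int :=
  let cur := get_block_length i disk
  if (cur : Int) < n then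
    match _h : PySem.List.index? (disk.drop (i + cur)) none with
    | none => none
    | some k => awhile n disk (i + cur + k)
  else some (i : Int)
termination_by disk.length - i
decreasing_by
  have hk := PySem.List.getElem_of_index?_eq_some _h
  obtain ⟨hklt, -, -⟩ := hk
  simp only [List.length_drop] at hklt
  have hc := get_block_length_pos i disk (by omega)
  omega

def get_suiting_free_block (n : Int) (disk : List (Option Int)) : Option Int :=
  match PySem.List.index? disk none with
  | none => none  -- Python raises ValueError here; excluded by Pre_
  | some i => awhile n disk i

-- ===== PORT B =====
-- the enumerate loop of Source B: run_start / run_len state, early return on run_len ≥ n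
def altGo (n : Int) : List (Option Int) → Nat → Nat → Nat → Option Int
  | [], _j, _rs, _rl => none
  | cell :: rest, j, rs, rl =>
    match cell with
    | none =>
      let rs' := if rl = 0 then j else rs
      if n ≤ (rl : Int) + 1 then some (rs' : Int)
      else altGo n rest (j + 1) rs' (rl + 1)
    | some _ => altGo n rest (j + 1) rs 0

def get_suiting_free_block_alt (n : Int) (disk : List (Option Int)) : Option Int :=
  altGo n disk 0 0 0

-- ===== PRECONDITION & SPEC =====
-- Pre_ excludes exactly the disks with no free (None) cell, on which A's
-- disk.index(None) raises ValueError (B's scan returns None there).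
def Pre_get_suiting_free_block (n : Int) (disk : List (Option Int)) : Prop := none ∈ disk
instance (n : Int) (disk : List (Option Int)) : Decidable (Pre_get_suiting_free_block n disk) := by unfold Pre_get_suiting_free_block; infer_instance

def pvWitness_get_suiting_free_block : Int × List (Option Int) := (1, [some 7, none])

def Spec_get_suiting_free_block (n : Int) (disk : List (Option Int)) (out : Option Int) : Prop := out = get_suiting_free_block_alt n disk
instance (n : Int) (disk : List (Option Int)) (out : Option Int) : Decidable (Spec_get_suiting_free_block n disk out) := by unfold Spec_get_suiting_free_block; infer_instance

-- ===== CLAIM (what is proved, stated in full; the proofs are below) =====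
def Claim_equal_get_suiting_free_block : Prop := ∀ (n : Int) (disk : List (Option Int)), Dom_get_suiting_free_block n disk → Pre_get_suiting_free_block n disk → Spec_get_suiting_free_block n disk (get_suiting_free_block n disk)

-- ===== LEMMAS AND PROOFS =====

-- characterisation of A's get_block_length loop
theorem blockLen_spec (disk : List (Option Int)) (i j : Nat) (hij : i ≤ j) (hjl : j ≤ disk.length) :
    i + blockLenGo i disk j ≤ disk.length ∧
    (∀ k, j ≤ k → k < i + blockLenGo i disk j → disk.getD k none = disk.getD i none) ∧
    (i + blockLenGo i disk j < disk.length →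
      disk.getD (i + blockLenGo i disk j) none ≠ disk.getD i none) := by
  rw [blockLenGo]
  split_ifs with h1 h2
  · have hji : i + (j - i) = j := by omega
    rw [hji]
    exact ⟨by omega, fun k hk1 hk2 => absurd hk2 (by omega), fun _ => fun he => h2 he.symm⟩
  · obtain ⟨ih1, ih2, ih3⟩ := blockLen_spec disk i (j + 1) (by omega) (by omega)
    refine ⟨ih1, fun k hk1 hk2 => ?_, ih3⟩
    rcases Nat.eq_or_lt_of_le hk1 with h | h
    · exact h ▸ (not_not.mp h2).symm
    · exact ih2 k h hk2
  · have hji : i + (j - i) = j := by omega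
    rw [hji]
    exact ⟨by omega, fun k hk1 hk2 => absurd hk2 (by omega), fun hl => absurd hl (by omega)⟩
termination_by disk.length - j
decreasing_by omega

theorem altGo_no_none (n : Int) (l : List (Option Int)) (hl : ∀ c ∈ l, c ≠ none) :
    ∀ j rs rl, altGo n l j rs rl = none := by
  induction l with
  | nil => intro j rs rl; rfl
  | cons c rest ih =>
    intro j rs rl
    cases c with
    | none => exact absurd rfl (hl none (by simp))
    | some v => exact ih (fun c hc => hl c (by simp [hc])) (j + 1) rs 0

theorem altGo_skip (n : Int) (l₁ l₂ : List (Option Int)) (h : ∀ c ∈ l₁, c ≠ none) :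
    ∀ j rs, altGo n (l₁ ++ l₂) j rs 0 = altGo n l₂ (j + l₁.length) rs 0 := by
  induction l₁ with
  | nil => intro j rs; simp
  | cons c rest ih =>
    intro j rs
    cases c with
    | none => exact absurd rfl (h none (by simp))
    | some v =>
      show altGo n (rest ++ l₂) (j + 1) rs 0 = _
      rw [ih (fun c hc => h c (by simp [hc])) (j + 1) rs]
      congr 1
      simp; omega

theorem altGo_run (n : Int) (l' : List (Option Int)) :
    ∀ (c j rs rl : Nat), 1 ≤ rl → (rl : Int) < n →
    altGo n (List.replicate c none ++ l') j rs rl =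
      if n ≤ (rl : Int) + c then some (rs : Int) else altGo n l' (j + c) rs (rl + c) := by
  intro c
  induction c with
  | zero =>
    intro j rs rl hrl hn
    rw [if_neg (by push_cast; omega)]
    simp
  | succ c ih =>
    intro j rs rl hrl hn
    show altGo n (none :: (List.replicate c none ++ l')) j rs rl = _
    show (let rs' := if rl = 0 then j else rs;
          if n ≤ (rl : Int) + 1 then some (rs' : Int)
          else altGo n (List.replicate c none ++ l') (j + 1) rs' (rl + 1)) = _
    have hrs : (if rl = 0 then j else rs) = rs := if_neg (by omega)
    simp only [hrs]
    by_cases hn1 : n ≤ (rl : Int) + 1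
    · rw [if_pos hn1, if_pos (by push_cast; omega)]
    · rw [if_neg hn1, ih (j + 1) rs (rl + 1) (by omega) (by push_cast at hn1 ⊢; omega)]
      have e2 : j + 1 + c = j + (c + 1) := by omega
      have e3 : rl + 1 + c = rl + (c + 1) := by omega
      have e4 : (n ≤ ((rl + 1 : Nat) : Int) + (c : Int)) = (n ≤ (rl : Int) + ((c + 1 : Nat) : Int)) :=
        propext (by push_cast; omega)
      rw [e2, e3]; simp only [e4]

theorem main_inv (n : Int) (disk : List (Option Int)) (i rs : Nat) (hi : i < disk.length)
    (hnone : disk.getD i none = none) :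
    awhile n disk i = altGo n (disk.drop i) i rs 0 := by
  set cur := get_block_length i disk with hcur
  have hgb : cur = blockLenGo i disk i := hcur
  obtain ⟨hlen, hall, hend⟩ := blockLen_spec disk i i le_rfl (le_of_lt hi)
  rw [← hgb] at hlen hall hend
  have hpos : 1 ≤ cur := get_block_length_pos i disk hi
  -- the run: disk.drop i starts with cur free cells
  have hrep : (disk.drop i).take cur = List.replicate cur none := by
    apply List.ext_getElem
    · simp; omega
    · intro k h1 h2
      have hk : k < cur := by simp at h1; omega
      have hv := hall (i + k) (by omega) (by omega)
      rw [List.getD_eq_getElem disk none (by omega), hnone] at hv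
      simpa [List.getElem_take, List.getElem_drop] using hv
  have hsplit : disk.drop i = List.replicate cur none ++ disk.drop (i + cur) := by
    conv_lhs => rw [← List.take_append_drop cur (disk.drop i)]
    rw [hrep, List.drop_drop]
  obtain ⟨c', hc'⟩ : ∃ c', cur = c' + 1 := ⟨cur - 1, by omega⟩
  have hconsrep : List.replicate cur (none : Option Int) = none :: List.replicate c' none := by
    rw [hc']; rfl
  have hA : awhile n disk i = (if (cur : Int) < n then
      match _h : PySem.List.index? (disk.drop (i + cur)) none with
      | none => none
      | some k => awhile n disk (i + cur + k)
    else some (i : Int)) := by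
    rw [awhile]
  rw [hA, hsplit, hconsrep, List.cons_append]
  by_cases hcn : (cur : Int) < n
  · rw [if_pos hcn]
    have hB1 : altGo n (none :: (List.replicate c' none ++ disk.drop (i + cur))) i rs 0
        = altGo n (List.replicate c' none ++ disk.drop (i + cur)) (i + 1) i 1 := by
      simp only [altGo]
      rw [if_neg (by push_cast at hcn ⊢; omega)]
      simp
    rw [hB1, altGo_run n (disk.drop (i + cur)) c' (i + 1) i 1 le_rfl (by push_cast at hcn ⊢; omega)]
    rw [if_neg (by push_cast at hcn ⊢; omega)]
    have hpos' : i + 1 + c' = i + cur := by omega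
    have hrl' : 1 + c' = cur := by omega
    rw [hpos', hrl']
    split
    · -- index? = none : no further free cell; both sides give none
      rename_i heq
      have hnn : (none : Option Int) ∉ disk.drop (i + cur) :=
        (PySem.List.index?_eq_none_iff _ _).mp heq
      rw [altGo_no_none n (disk.drop (i + cur)) (fun c hc => by rintro rfl; exact hnn hc)]
    · -- index? = some k : hop to the next free cell, recurse
      rename_i k heq
      obtain ⟨hklt, hkv, hkmin⟩ := PySem.List.getElem_of_index?_eq_some heq
      obtain ⟨pre, suf, hdec, hplen, hpnn⟩ := (PySem.List.index?_eq_some_iff _ _ _).mp heq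
      have hreslen : (disk.drop (i + cur)).length = disk.length - (i + cur) := by simp
      have hi' : i + cur + k < disk.length := by
        rw [hdec] at hreslen; simp at hreslen; omega
      have hcurlt : i + cur < disk.length := by omega
      have hnone' : disk.getD (i + cur + k) none = none := by
        rw [List.getD_eq_getElem disk none hi']
        have h2 : disk[i + cur + k]'hi' = (disk.drop (i + cur))[k]'hklt := List.getElem_drop.symm
        rw [h2, hkv]
      have hk1 : 1 ≤ k := by
        rcases Nat.eq_zero_or_pos k with h0 | h; swap; · exact h
        exfalso
        subst h0
        have hge : disk.getD (i + cur) none ≠ none := fun h => (hend hcurlt) (h.trans hnone.symm)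
        rw [Nat.add_zero] at hnone'
        exact hge hnone'
      obtain ⟨p0, pre', hpre⟩ : ∃ p0 pre', pre = p0 :: pre' := by
        cases pre with
        | nil => exfalso; simp at hplen; omega
        | cons a b => exact ⟨a, b, rfl⟩
      obtain ⟨v, hp0⟩ : ∃ v, p0 = some v := by
        cases p0 with
        | none => exfalso; exact hpnn (by rw [hpre]; simp)
        | some v => exact ⟨v, rfl⟩
      subst hpre hp0
      rw [hdec]
      have hB2 : altGo n ((some v :: pre') ++ none :: suf) (i + cur) i cur
          = altGo n (pre' ++ none :: suf) (i + cur + 1) i 0 := by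
        simp only [List.cons_append, altGo]
      rw [hB2, altGo_skip n pre' (none :: suf)
        (fun c hc => by rintro rfl; exact hpnn (List.mem_cons_of_mem _ hc)) (i + cur + 1) i]
      have hplen' : i + cur + 1 + pre'.length = i + cur + k := by simp at hplen; omega
      rw [hplen']
      have hdrop : disk.drop (i + cur + k) = none :: suf := by
        have h1 : (disk.drop (i + cur)).drop k = disk.drop (i + cur + k) := by
          rw [List.drop_drop]
        rw [← h1, hdec, ← hplen, List.drop_left]
      rw [← hdrop]
      exact main_inv n disk (i + cur + k) i hi' hnone'
  · rw [if_neg hcn]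
    have hn' : n ≤ (cur : Int) := by omega
    by_cases hn1 : n ≤ (1 : Int)
    · have hB1 : altGo n (none :: (List.replicate c' none ++ disk.drop (i + cur))) i rs 0
          = some (i : Int) := by
        simp only [altGo]
        rw [if_pos (by push_cast; omega)]
        simp
      rw [hB1]
    · have hB1 : altGo n (none :: (List.replicate c' none ++ disk.drop (i + cur))) i rs 0
          = altGo n (List.replicate c' none ++ disk.drop (i + cur)) (i + 1) i 1 := by
        simp only [altGo]
        rw [if_neg (by push_cast at hn1 ⊢; omega)]
        simp
      rw [hB1, altGo_run n (disk.drop (i + cur)) c' (i + 1) i 1 le_rfl (by omega)]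
      rw [if_pos (by push_cast; omega)]
termination_by disk.length - i
decreasing_by omega

-- ===== VERDICT (by name: the statement is the Claim_ definition above) =====
theorem get_suiting_free_block_spec : Claim_equal_get_suiting_free_block := by
  intro n disk _hdom hpre
  unfold Spec_get_suiting_free_block get_suiting_free_block get_suiting_free_block_alt
  have hsome : (PySem.List.index? disk none).isSome :=
    (PySem.List.index?_isSome_iff _ _).mpr hpre
  obtain ⟨i₀, hidx⟩ := Option.isSome_iff_exists.mp hsome
  rw [hidx]
  obtain ⟨hi0, hv0, -⟩ := PySem.List.getElem_of_index?_eq_some hidx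
  obtain ⟨pre, suf, hdec, hplen, hpnn⟩ := (PySem.List.index?_eq_some_iff _ _ _).mp hidx
  have hnone0 : disk.getD i₀ none = none := by
    rw [List.getD_eq_getElem disk none hi0, hv0]
  have hdrop : disk.drop i₀ = none :: suf := by rw [hdec, ← hplen, List.drop_left]
  have hB : altGo n disk 0 0 0 = altGo n (none :: suf) i₀ 0 0 := by
    conv_lhs => rw [hdec]
    rw [altGo_skip n pre (none :: suf) (fun c hc => by rintro rfl; exact hpnn hc) 0 0]
    rw [Nat.zero_add, hplen]
  show awhile n disk i₀ = altGo n disk 0 0 0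
  rw [main_inv n disk i₀ 0 hi0 hnone0, hdrop, hB]
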